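-- pv_equiv track=rewrite | github.com/ankurbhambri/DS-Algo | sliding-window/fixed-size/diff-max-min-each-window.py | max_diff_in_window
-- ===== SOURCE A (Python) =====
-- from collections import deque
--
-- def max_diff_in_window(nums, k):
--
--     res = []
--     max_q, min_q = deque(), deque()
--
--     for i in range(len(nums)):
--
--         while max_q and nums[max_q[-1]] < nums[i]:
--             max_q.pop()
--
--         while min_q and nums[min_q[-1]] > nums[i]:
--             min_q.pop()
--
--         max_q.append(i)
--         min_q.append(i)
--
--         if max_q[0] <= i - k:
--             max_q.popleft()
--
--         if min_q[0] <= i - k: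
--             min_q.popleft()
--
--         if i >= k - 1:
--             res.append(nums[max_q[0]] - nums[min_q[0]])
--
--     return res
-- ===== SOURCE B (Python) =====
-- def max_diff_in_window(nums, k):
--     # Per-window scan: max/min of each length-k slice, instead of monotonic deques.
--     return [max(nums[i:i + k]) - min(nums[i:i + k]) for i in range(len(nums) - k + 1)]
-- ===== Notes on version B (the rewrite author's own statement) =====
-- stated objective: simpler
-- what changed: Replaces the two monotonic index deques with a one-line per-window scan that takes max(window)-min(window) of each length-k slice.
-- outside the precondition, e.g. on max_diff_in_window([], 0): A returns [], B raises ValueError; on max_diff_in_window([], -2): A returns [], B raises ValueError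
import Mathlib
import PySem

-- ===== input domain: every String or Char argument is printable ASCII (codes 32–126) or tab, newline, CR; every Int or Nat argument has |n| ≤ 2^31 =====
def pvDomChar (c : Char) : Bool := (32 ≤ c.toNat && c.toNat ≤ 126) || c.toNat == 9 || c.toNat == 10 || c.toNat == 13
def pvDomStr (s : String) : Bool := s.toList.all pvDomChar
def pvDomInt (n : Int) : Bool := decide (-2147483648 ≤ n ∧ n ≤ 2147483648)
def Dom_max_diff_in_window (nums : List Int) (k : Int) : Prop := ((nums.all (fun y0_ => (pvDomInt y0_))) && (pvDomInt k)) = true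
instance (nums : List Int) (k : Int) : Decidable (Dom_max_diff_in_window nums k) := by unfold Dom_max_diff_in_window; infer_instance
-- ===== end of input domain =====

-- B replaces A's two monotonic index deques by a plain per-window scan (max(w) - min(w) of each
-- length-k slice): simpler, not faster. Equivalence is proved on Pre_ (k ≥ 1), where A returns.

-- ===== PORT A =====
-- Deques of indices are Lists, front first: 'while q and nums[q[-1]] …: q.pop()' is rdropWhile,
-- append is ++ [i], popleft is tail. All list indexings nums[i]/nums[q[..]] use indices produced by
-- range(len(nums)), always in range, so getD 0 is exact there.
def pvStepA (nums : List Int) (k : Int) (st : List Int × List Nat × List Nat) (i : Nat) :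
    List Int × List Nat × List Nat :=
  let res := st.1
  let maxq := (st.2.1).rdropWhile (fun j => decide (nums.getD j 0 < nums.getD i 0)) ++ [i]
  let minq := (st.2.2).rdropWhile (fun j => decide (nums.getD i 0 < nums.getD j 0)) ++ [i]
  let maxq := if ((maxq.headD 0 : Nat) : Int) ≤ (i : Int) - k then maxq.tail else maxq
  let minq := if ((minq.headD 0 : Nat) : Int) ≤ (i : Int) - k then minq.tail else minq
  let res := if (i : Int) ≥ k - 1 then
      res ++ [nums.getD (maxq.headD 0) 0 - nums.getD (minq.headD 0) 0]
    else res
  (res, maxq, minq)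

def max_diff_in_window (nums : List Int) (k : Int) : List Int :=
  ((List.range nums.length).foldl (pvStepA nums k) ([], [], [])).1

-- ===== PORT B =====
-- max()/min() of the (nonempty under Pre_) window: PySem.List.max?/min?, getD 0 never hit on Pre_.
def max_diff_in_window_alt (nums : List Int) (k : Int) : List Int :=
  (PySem.List.pyRange 0 ((nums.length : Int) - k + 1) 1).map (fun i =>
    let w := PySem.List.slice nums (some i) (some (i + k))
    (PySem.List.max? w (fun x => x)).getD 0 - (PySem.List.min? w (fun x => x)).getD 0)

-- ===== PRECONDITION & SPEC =====
-- Pre_ excludes k ≤ 0: there A raises IndexError on every nonempty nums, and on empty nums A's []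
-- is unreachable for B, whose per-window max() raises ValueError on the empty windows k ≤ 0 yields.
def Pre_max_diff_in_window (nums : List Int) (k : Int) : Prop := 1 ≤ k
instance (nums : List Int) (k : Int) : Decidable (Pre_max_diff_in_window nums k) := by
  unfold Pre_max_diff_in_window; infer_instance

def pvWitness_max_diff_in_window : List Int × Int := ([1, 3, -2, 5], 2)

def Spec_max_diff_in_window (nums : List Int) (k : Int) (out : List Int) : Prop := out = max_diff_in_window_alt nums k
instance (nums : List Int) (k : Int) (out : List Int) : Decidable (Spec_max_diff_in_window nums k out) := by unfold Spec_max_diff_in_window; infer_instance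

-- ===== CLAIM (what is proved, stated in full; the proofs are below) =====
def Claim_equal_max_diff_in_window : Prop := ∀ (nums : List Int) (k : Int), Dom_max_diff_in_window nums k → Pre_max_diff_in_window nums k → Spec_max_diff_in_window nums k (max_diff_in_window nums k)

-- ===== LEMMAS AND PROOFS =====

-- value of nums at index j (indices are always in range where used)
def pvG (nums : List Int) (j : Nat) : Int := nums.getD j 0

-- 'j survives in the monotonic deque after processing 0..i': j is in the window and no later
-- element of the window beats it
def pvOk (h : Nat → Int) (k : Int) (i j : Nat) : Bool :=
  decide ((i : Int) - k < (j : Int)) && (List.range' (j+1) (i - j)).all (fun l => decide (h l ≤ h j))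

-- the deque (front first) after processing indices 0..i
def pvQ (h : Nat → Int) (k : Int) (i : Nat) : List Nat :=
  (List.range (i+1)).filter (pvOk h k i)

lemma pvMem_pvQ (h : Nat → Int) (k : Int) (i j : Nat) :
    j ∈ pvQ h k i ↔ j ≤ i ∧ (i : Int) - k < (j : Int) ∧ ∀ l, j < l → l ≤ i → h l ≤ h j := by
  simp only [pvQ, pvOk, List.mem_filter, List.mem_range, Bool.and_eq_true, List.all_eq_true,
    List.mem_range'_1, decide_eq_true_eq]
  constructor
  · rintro ⟨hj, hwin, hall⟩
    exact ⟨by omega, hwin, fun l hl1 hl2 => hall l ⟨by omega, by omega⟩⟩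
  · rintro ⟨hj, hwin, hall⟩
    exact ⟨by omega, hwin, fun l ⟨hl1, hl2⟩ => hall l (by omega) (by omega)⟩

lemma pvQ_pairwise (h : Nat → Int) (k : Int) (i : Nat) : (pvQ h k i).Pairwise (· < ·) :=
  List.pairwise_lt_range.filter _

lemma pvQ_self_mem (h : Nat → Int) (k : Int) (hk : 1 ≤ k) (i : Nat) : i ∈ pvQ h k i := by
  rw [pvMem_pvQ]
  exact ⟨le_rfl, by omega, fun l hl1 hl2 => by omega⟩

lemma pvQ_ne_nil (h : Nat → Int) (k : Int) (hk : 1 ≤ k) (i : Nat) : pvQ h k i ≠ [] :=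
  List.ne_nil_of_mem (pvQ_self_mem h k hk i)

lemma pvHeadD_mem {l : List Nat} (hl : l ≠ []) : l.headD 0 ∈ l := by
  cases l with
  | nil => exact absurd rfl hl
  | cons a t => exact List.mem_cons_self

lemma pvHeadD_min {l : List Nat} (hp : l.Pairwise (· < ·)) {b : Nat} (hb : b ∈ l) :
    l.headD 0 ≤ b := by
  cases l with
  | nil => cases hb
  | cons a t =>
    rcases List.mem_cons.mp hb with rfl | hbt
    · exact le_rfl
    · exact le_of_lt ((List.pairwise_cons.mp hp).1 b hbt)

-- the head of the deque is a maximum (for h) of the whole current window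
lemma pvQ_head_ub (h : Nat → Int) (k : Int) (hk : 1 ≤ k) (i : Nat) :
    ∀ j : Nat, (i : Int) - k < (j : Int) → j ≤ i → h j ≤ h ((pvQ h k i).headD 0) := by
  have hne := pvQ_ne_nil h k hk i
  have hpair := pvQ_pairwise h k i
  have hmemQ : ∀ j : Nat, j ∈ pvQ h k i → h j ≤ h ((pvQ h k i).headD 0) := by
    intro j hj
    have hm := pvHeadD_mem hne
    have hle := pvHeadD_min hpair hj
    rcases Nat.lt_or_ge ((pvQ h k i).headD 0) j with hlt | hge
    · exact ((pvMem_pvQ h k i _).mp hm).2.2 j hlt ((pvMem_pvQ h k i j).mp hj).1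
    · have : j = (pvQ h k i).headD 0 := le_antisymm (le_trans hge le_rfl) hle
      exact this ▸ le_rfl
  suffices H : ∀ d : Nat, ∀ j : Nat, i - j ≤ d → (i : Int) - k < (j : Int) → j ≤ i →
      h j ≤ h ((pvQ h k i).headD 0) by
    exact fun j h1 h2 => H (i - j) j le_rfl h1 h2
  intro d
  induction d with
  | zero =>
    intro j hd h1 h2
    have : j = i := by omega
    subst this
    exact hmemQ j (pvQ_self_mem h k hk j)
  | succ d ih =>
    intro j hd h1 h2
    by_cases hj : j ∈ pvQ h k i
    · exact hmemQ j hj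
    · rw [pvMem_pvQ] at hj
      push_neg at hj
      obtain ⟨l, hl1, hl2, hl3⟩ := hj h2 h1
      exact le_of_lt (lt_of_lt_of_le hl3 (ih l (by omega) (by omega) hl2))

-- a while-pop from the back of a deque whose elements only get (weakly) worse towards the back
-- removes exactly the failing suffix
lemma pvDropWhile_eq_filter {α : Type} (p : α → Bool) :
    ∀ l : List α, l.Pairwise (fun a b => p b = true → p a = true) →
      l.dropWhile p = l.filter (fun a => !p a) := by
  intro l
  induction l with
  | nil => intro _; rfl
  | cons a t ih =>
    intro hp
    rw [List.pairwise_cons] at hp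
    by_cases ha : p a = true
    · rw [List.dropWhile_cons_of_pos ha, List.filter_cons_of_neg (by simp [ha]), ih hp.2]
    · rw [List.dropWhile_cons_of_neg ha, List.filter_cons_of_pos (by simp [ha])]
      congr 1
      exact (List.filter_eq_self.mpr (fun b hb => by
        simp only [Bool.not_eq_eq_eq_not, Bool.not_true]
        exact Bool.eq_false_iff.mpr (fun hbp => ha (hp.1 b hb hbp)))).symm

lemma pvRdropWhile_eq_filter {α : Type} (p : α → Bool) (l : List α)
    (hp : l.Pairwise (fun a b => p a = true → p b = true)) :
    l.rdropWhile p = l.filter (fun a => !p a) := by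
  rw [List.rdropWhile, pvDropWhile_eq_filter p l.reverse (List.pairwise_reverse.mpr hp),
    ← List.filter_reverse, List.reverse_reverse]

-- members of the deque dominate (under h) every later member
lemma pvQ_pairwise_h (h : Nat → Int) (k : Int) (i : Nat) :
    (pvQ h k i).Pairwise (fun a b => h b ≤ h a) := by
  refine List.Pairwise.imp_of_mem ?_ (pvQ_pairwise h k i)
  intro a b ha hb hab
  exact ((pvMem_pvQ h k i a).mp ha).2.2 b hab ((pvMem_pvQ h k i b).mp hb).1

-- one full deque update (pop-back while smaller, append i+1, one stale pop at the front)
lemma pvQ_step (h : Nat → Int) (k : Int) (hk : 1 ≤ k) (i : Nat) :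
    (let q := (pvQ h k i).rdropWhile (fun j => decide (h j < h (i+1))) ++ [i+1]
     if ((q.headD 0 : Nat) : Int) ≤ ((i+1 : Nat) : Int) - k then q.tail else q) =
      pvQ h k (i+1) := by
  have hdrop : (pvQ h k i).rdropWhile (fun j => decide (h j < h (i+1))) =
      (pvQ h k i).filter (fun j => decide (h (i+1) ≤ h j)) := by
    rw [pvRdropWhile_eq_filter _ _ ?_]
    · refine List.filter_congr (fun j _ => ?_)
      simp only [← decide_not, decide_eq_decide]
      omega
    · refine (pvQ_pairwise_h h k i).imp_of_mem ?_
      intro a b _ _ hab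
      simp only [decide_eq_true_eq]
      exact fun ha => lt_of_le_of_lt hab ha
  -- the new deque as a filter of the old one
  have hQsucc : pvQ h k (i+1) =
      (((pvQ h k i).filter (fun j => decide (h (i+1) ≤ h j))).filter
        (fun j : Nat => decide (((i+1 : Nat) : Int) - k < (j : Int)))) ++ [i+1] := by
    rw [List.filter_filter, pvQ, List.range_succ, List.filter_append]
    have hself : (List.filter (pvOk h k (i+1)) [i+1]) = [i+1] := by
      have hok : pvOk h k (i+1) (i+1) = true := by
        unfold pvOk
        simp only [Nat.sub_self, List.range'_zero, List.all_nil, Bool.and_true,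
          decide_eq_true_eq]
        push_cast; omega
      simp [hok]
    rw [hself]
    congr 1
    rw [pvQ, List.filter_filter]
    refine List.filter_congr ?_
    intro j hj
    rw [List.mem_range] at hj
    have hrange : List.range' (j+1) (i+1-j) = List.range' (j+1) (i-j) ++ [i+1] := by
      have h1 : i+1-j = (i-j)+1 := by omega
      have h2 : (j+1) + 1*(i-j) = i+1 := by omega
      rw [h1, List.range'_concat, h2]
    simp only [pvOk, hrange, List.all_append, List.all_cons, List.all_nil, Bool.and_true]
    rw [Bool.eq_iff_iff]
    simp only [Bool.and_eq_true, List.all_eq_true, decide_eq_true_eq]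
    constructor
    · rintro ⟨hA, hAll, hB⟩
      exact ⟨⟨hA, hB⟩, by omega, hAll⟩
    · rintro ⟨⟨hA, hB⟩, _, hAll⟩
      exact ⟨hA, hAll, hB⟩
  rw [hdrop, hQsucc]
  set G := (pvQ h k i).filter (fun j => decide (h (i+1) ≤ h j)) with hG
  have hGpair : G.Pairwise (· < ·) := (pvQ_pairwise h k i).filter _
  have hGmem : ∀ j ∈ G, (i : Int) - k < (j : Int) := by
    intro j hj
    exact ((pvMem_pvQ h k i j).mp (List.mem_of_mem_filter hj)).2.1
  cases hGc : G with
  | nil =>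
    simp only [List.nil_append, List.headD_cons, List.filter_nil]
    rw [if_neg (by push_cast; omega)]
  | cons a t =>
    have haG : a ∈ G := by rw [hGc]; exact List.mem_cons_self
    have hawin : (i : Int) - k < (a : Int) := hGmem a haG
    have htgt : ∀ b ∈ t, a < b := (List.pairwise_cons.mp (hGc ▸ hGpair)).1
    have hhead : ((a :: t) ++ [i+1]).headD 0 = a := rfl
    by_cases hstale : ((a : Nat) : Int) ≤ ((i+1 : Nat) : Int) - k
    · rw [if_pos (by rw [hhead]; exact_mod_cast hstale)]
      have hft : t.filter (fun j : Nat => decide (((i+1 : Nat) : Int) - k < (j : Int))) = t := by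
        refine List.filter_eq_self.mpr ?_
        intro b hb
        have hab := htgt b hb
        have := hGmem b (by rw [hGc]; exact List.mem_cons_of_mem a hb)
        simp only [decide_eq_true_eq]
        omega
      calc ((a :: t) ++ [i+1]).tail = t ++ [i+1] := rfl
        _ = (List.filter (fun j : Nat => decide (((i+1 : Nat) : Int) - k < (j : Int)))
              (a :: t)) ++ [i+1] := by
            rw [List.filter_cons, if_neg (by simp only [decide_eq_true_eq]; omega), hft]
    · rw [if_neg (by rw [hhead]; exact_mod_cast hstale)]
      have hft : t.filter (fun j : Nat => decide (((i+1 : Nat) : Int) - k < (j : Int))) = t := by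
        refine List.filter_eq_self.mpr ?_
        intro b hb
        have hab := htgt b hb
        simp only [decide_eq_true_eq]
        omega
      rw [List.filter_cons, if_pos (by simp only [decide_eq_true_eq]; omega), hft]

lemma pvQ_zero (h : Nat → Int) (k : Int) (hk : 1 ≤ k) : pvQ h k 0 = [0] := by
  have hok : pvOk h k 0 0 = true := by
    unfold pvOk
    simp only [Nat.sub_self, List.range'_zero, List.all_nil, Bool.and_true,
      decide_eq_true_eq, Nat.cast_zero]
    omega
  simp [pvQ, List.range_one, hok]

-- the state components after processing m indices (m = 0: everything empty)
def pvQQ (h : Nat → Int) (k : Int) : Nat → List Nat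
  | 0 => []
  | m+1 => pvQ h k m

def pvR (nums : List Int) (k : Int) (m : Nat) : List Int :=
  ((List.range m).filter (fun t : Nat => decide ((k : Int) - 1 ≤ (t : Int)))).map (fun t =>
    nums.getD ((pvQ (pvG nums) k t).headD 0) 0
      - nums.getD ((pvQ (fun j => -(pvG nums j)) k t).headD 0) 0)

-- loop invariant of A's fold
lemma pvInv (nums : List Int) (k : Int) (hk : 1 ≤ k) (m : Nat) :
    (List.range m).foldl (pvStepA nums k) ([], [], []) =
      (pvR nums k m, pvQQ (pvG nums) k m, pvQQ (fun j => -(pvG nums j)) k m) := by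
  induction m with
  | zero => simp [pvR, pvQQ]
  | succ m ih =>
    rw [List.range_succ, List.foldl_append, List.foldl_cons, List.foldl_nil, ih]
    have hmaxpred : (fun j => decide (nums.getD j 0 < nums.getD m 0)) =
        (fun j => decide (pvG nums j < pvG nums m)) := rfl
    have hminpred : (fun j => decide (nums.getD m 0 < nums.getD j 0)) =
        (fun j => decide ((fun j => -(pvG nums j)) j < (fun j => -(pvG nums j)) m)) := by
      funext j; simp [pvG]
    -- queue components
    have hmax : (let q := ((pvQQ (pvG nums) k m).rdropWhile
          (fun j => decide (nums.getD j 0 < nums.getD m 0))) ++ [m]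
        if ((q.headD 0 : Nat) : Int) ≤ (m : Int) - k then q.tail else q) = pvQ (pvG nums) k m := by
      cases m with
      | zero =>
        simp only [pvQQ, List.rdropWhile_nil, List.nil_append, List.headD_cons,
          Nat.cast_zero]
        rw [if_neg (by omega), pvQ_zero _ _ hk]
      | succ m' =>
        rw [hmaxpred]
        exact pvQ_step (pvG nums) k hk m'
    have hmin : (let q := ((pvQQ (fun j => -(pvG nums j)) k m).rdropWhile
          (fun j => decide (nums.getD m 0 < nums.getD j 0))) ++ [m]
        if ((q.headD 0 : Nat) : Int) ≤ (m : Int) - k then q.tail else q) =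
          pvQ (fun j => -(pvG nums j)) k m := by
      cases m with
      | zero =>
        simp only [pvQQ, List.rdropWhile_nil, List.nil_append, List.headD_cons,
          Nat.cast_zero]
        rw [if_neg (by omega), pvQ_zero _ _ hk]
      | succ m' =>
        rw [hminpred]
        exact pvQ_step (fun j => -(pvG nums j)) k hk m'
    simp only [pvStepA] at *
    rw [hmax, hmin]
    -- result component
    have hres : (if (m : Int) ≥ k - 1 then
          pvR nums k m ++ [nums.getD ((pvQ (pvG nums) k m).headD 0) 0
            - nums.getD ((pvQ (fun j => -(pvG nums j)) k m).headD 0) 0]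
        else pvR nums k m) = pvR nums k (m+1) := by
      simp only [pvR, List.range_succ, List.filter_append, List.map_append]
      by_cases hm : (k : Int) - 1 ≤ (m : Int)
      · rw [if_pos (by omega)]
        simp only [List.filter_cons, List.filter_nil, decide_eq_true_eq]
        rw [if_pos hm]
        rfl
      · rw [if_neg (by omega)]
        simp only [List.filter_cons, List.filter_nil, decide_eq_true_eq]
        rw [if_neg hm]
        simp
    rw [hres]
    rfl

-- window of length kn ending at index i = kn-1+s, as values
lemma pvDropTake (nums : List Int) (s kn : Nat) (hle : s + kn ≤ nums.length) :
    (nums.drop s).take kn = (List.range' s kn).map (fun j => nums.getD j 0) := by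
  apply List.ext_getElem
  · simp; omega
  · intro n h1 h2
    have hn : n < kn := by simpa using h2
    have hsn : s + n < nums.length := by omega
    simp only [List.getElem_take, List.getElem_drop, List.getElem_map, List.getElem_range']
    rw [List.getD_eq_getElem nums 0 (by omega)]
    congr 1
    omega

lemma pvFilterRange (c n : Nat) (hc : c ≤ n) :
    (List.range n).filter (fun t => decide (c ≤ t)) = List.range' c (n - c) := by
  induction n with
  | zero => simp
  | succ n ih =>
    rcases Nat.lt_or_ge n c with hn | hn
    · have hcn : c = n + 1 := by omega
      subst hcn
      rw [Nat.sub_self, List.range'_zero, List.filter_eq_nil_iff]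
      intro t ht
      rw [List.mem_range] at ht
      simp only [decide_eq_true_eq]
      omega
    · rw [List.range_succ, List.filter_append, ih hn]
      have : (n + 1) - c = (n - c) + 1 := by omega
      rw [this, List.range'_concat]
      have : c + 1 * (n - c) = n := by omega
      rw [this]
      simp [hn]

-- max? / min? of the window in terms of the deque heads
lemma pvMax_window (nums : List Int) (k : Int) (hk : 1 ≤ k) (s : Nat) :
    PySem.List.max? ((List.range' s k.toNat).map (fun j => nums.getD j 0)) (fun x => x) =
      some (nums.getD ((pvQ (pvG nums) k (k.toNat - 1 + s)).headD 0) 0) := by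
  have hkn : (1 : Nat) ≤ k.toNat := by omega
  have hknk : ((k.toNat : Nat) : Int) = k := Int.toNat_of_nonneg (by omega)
  set i := k.toNat - 1 + s with hi
  set m := (pvQ (pvG nums) k i).headD 0 with hm
  have hmmem : m ∈ pvQ (pvG nums) k i := pvHeadD_mem (pvQ_ne_nil _ _ hk i)
  obtain ⟨hb1, hb2, -⟩ := (pvMem_pvQ (pvG nums) k i m).mp hmmem
  have hmwin : m ∈ List.range' s k.toNat := by
    rw [List.mem_range'_1]
    omega
  have hub := pvQ_head_ub (pvG nums) k hk i
  have hne : ((List.range' s k.toNat).map (fun j => nums.getD j 0)) ≠ [] := by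
    intro hc
    have hlen := congrArg List.length hc
    simp only [List.length_map, List.length_range', List.length_nil] at hlen
    omega
  obtain ⟨v, hv⟩ : ∃ v, PySem.List.max?
      ((List.range' s k.toNat).map (fun j => nums.getD j 0)) (fun x => x) = some v := by
    cases hcase : PySem.List.max?
        ((List.range' s k.toNat).map (fun j => nums.getD j 0)) (fun x => x) with
    | none => exact absurd ((PySem.List.max?_eq_none_iff _ _).mp hcase) hne
    | some v => exact ⟨v, rfl⟩
  rw [hv]
  congr 1
  have hvmem := PySem.List.max?_mem hv
  have hvmax := PySem.List.max?_isMax hv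
  obtain ⟨j, hjmem, hjv⟩ := List.mem_map.mp hvmem
  rw [List.mem_range'_1] at hjmem
  have hjub : v ≤ nums.getD m 0 := by
    rw [← hjv]
    exact hub j (by omega) (by omega)
  have hmub : nums.getD m 0 ≤ v := by
    refine hvmax (nums.getD m 0) ?_
    exact List.mem_map.mpr ⟨m, hmwin, rfl⟩
  exact le_antisymm hjub hmub

lemma pvMin_window (nums : List Int) (k : Int) (hk : 1 ≤ k) (s : Nat) :
    PySem.List.min? ((List.range' s k.toNat).map (fun j => nums.getD j 0)) (fun x => x) =
      some (nums.getD ((pvQ (fun j => -(pvG nums j)) k (k.toNat - 1 + s)).headD 0) 0) := by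
  have hkn : (1 : Nat) ≤ k.toNat := by omega
  have hknk : ((k.toNat : Nat) : Int) = k := Int.toNat_of_nonneg (by omega)
  set h := fun j => -(pvG nums j) with hh
  set i := k.toNat - 1 + s with hi
  set m := (pvQ h k i).headD 0 with hm
  have hmmem : m ∈ pvQ h k i := pvHeadD_mem (pvQ_ne_nil _ _ hk i)
  obtain ⟨hb1, hb2, -⟩ := (pvMem_pvQ h k i m).mp hmmem
  have hmwin : m ∈ List.range' s k.toNat := by
    rw [List.mem_range'_1]
    omega
  have hub := pvQ_head_ub h k hk i
  have hne : ((List.range' s k.toNat).map (fun j => nums.getD j 0)) ≠ [] := by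
    intro hc
    have hlen := congrArg List.length hc
    simp only [List.length_map, List.length_range', List.length_nil] at hlen
    omega
  obtain ⟨v, hv⟩ : ∃ v, PySem.List.min?
      ((List.range' s k.toNat).map (fun j => nums.getD j 0)) (fun x => x) = some v := by
    cases hcase : PySem.List.min?
        ((List.range' s k.toNat).map (fun j => nums.getD j 0)) (fun x => x) with
    | none => exact absurd ((PySem.List.min?_eq_none_iff _ _).mp hcase) hne
    | some v => exact ⟨v, rfl⟩
  rw [hv]
  congr 1
  have hvmem := PySem.List.min?_mem hv
  have hvmin := PySem.List.min?_isMin hv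
  obtain ⟨j, hjmem, hjv⟩ := List.mem_map.mp hvmem
  rw [List.mem_range'_1] at hjmem
  have hjub : nums.getD m 0 ≤ v := by
    rw [← hjv]
    have := hub j (by omega) (by omega)
    rw [← hm] at this
    simp only [hh, pvG] at this
    omega
  have hmub : v ≤ nums.getD m 0 := by
    refine hvmin (nums.getD m 0) ?_
    exact List.mem_map.mpr ⟨m, hmwin, rfl⟩
  exact le_antisymm hmub hjub

-- ===== VERDICT (by name: the statement is the Claim_ definition above) =====
theorem max_diff_in_window_spec : Claim_equal_max_diff_in_window := by
  intro nums k _ hk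
  unfold Pre_max_diff_in_window at hk
  unfold Spec_max_diff_in_window max_diff_in_window max_diff_in_window_alt
  rw [pvInv nums k hk nums.length]
  set n := nums.length with hn
  have hknk : ((k.toNat : Nat) : Int) = k := Int.toNat_of_nonneg (by omega)
  have hkn : 1 ≤ k.toNat := by omega
  rcases Nat.lt_or_ge n k.toNat with hsmall | hbig
  · -- no window fits: both sides are []
    rw [PySem.List.pyRange_one_eq_nil (by omega), List.map_nil]
    simp only [pvR]
    rw [List.filter_eq_nil_iff.mpr ?_]
    · rfl
    · intro t ht
      rw [List.mem_range] at ht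
      simp only [decide_eq_true_eq]
      omega
  · -- kn ≤ n: reindex the windows by their start s = t - (kn - 1)
    have hcast : (n : Int) - k + 1 = ((n - k.toNat + 1 : Nat) : Int) := by
      omega
    rw [hcast, PySem.List.pyRange_zero_natCast, List.map_map]
    simp only [pvR]
    have hfc : (List.range n).filter (fun t : Nat => decide ((k : Int) - 1 ≤ (t : Int))) =
        (List.range n).filter (fun t => decide (k.toNat - 1 ≤ t)) := by
      refine List.filter_congr ?_
      intro t _
      simp only [decide_eq_decide]
      omega
    rw [hfc, pvFilterRange (k.toNat - 1) n (by omega), List.range'_eq_map_range, List.map_map]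
    have hcount : n - (k.toNat - 1) = n - k.toNat + 1 := by omega
    rw [hcount]
    refine List.map_congr_left ?_
    intro s hs
    rw [List.mem_range] at hs
    simp only [Function.comp]
    have hslice : PySem.List.slice nums (some ((s : Nat) : Int)) (some (((s : Nat) : Int) + k)) =
        (List.range' s k.toNat).map (fun j => nums.getD j 0) := by
      rw [show ((s : Nat) : Int) + k = ((s : Nat) : Int) + ((k.toNat : Nat) : Int) from by
        rw [hknk]]
      rw [PySem.List.slice_natCast_add, pvDropTake nums s k.toNat (by omega)]
    rw [hslice, pvMax_window nums k hk s, pvMin_window nums k hk s]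
    simp only [Option.getD_some]
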